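-- pv_equiv track=rewrite | github.com/jayluo2/k562_custom_genomes | program/k562_custom_genome.py | coor_rm_del
-- ===== SOURCE A (Python) =====
-- def rm_ind(coor_l, ind_l):
--     """ Remove elements from given list
--     """
--     return [i for ind, i in enumerate(coor_l) if ind not in ind_l]
--
-- def coor_rm_del(inter_coor, ins_coor, del_coor):
--     """ Identify and remove deletion variant coordinates from coordinate list
--
--     Deletions can overlap with other deletions because deleted bases are
--     lost relative to the reference genome, and these deleted bases have
--     reference genome coordinates. A deletion cannot occur in an already-deleted region
--     (relative to the reference genome).
--
--     :param ins_coor: filtered nested list of insertion coordinates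
--     :param del_coor: unfiltered nested list of deletion coordinates
--     :return:
--     """
--     del_reg_l = []
--     del_rm_ind = []
--     for ind, reg_i in enumerate(del_coor):
--         reg_i_sta, reg_i_end = reg_i[0], reg_i[1]
--         del_reg_l.append([reg_i_sta, reg_i_end])
--         for coor in ins_coor:        # check overlap with insertions
--             if reg_i_sta <= coor[0] <= reg_i_end:
--                 del_rm_ind.append(ind)
--         for coor_i in inter_coor:
--             coord = coor_i[1]
--             if reg_i_sta <= coord <= reg_i_end:
--                 del_rm_ind.append(ind)
--
--     # overlapping deletions are addressed during integration, and so is overlap with intrachromosomal rearrangements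
--
--     del_coor_filt = rm_ind(del_coor, del_rm_ind)
--
--     return del_coor_filt, del_rm_ind
-- ===== SOURCE B (Python) =====
-- def coor_rm_del(inter_coor, ins_coor, del_coor):
--     # Sort all insertion/intersection points once, then count points inside
--     # each deletion interval with binary search (bisect_left/bisect_right,
--     # hand-rolled since no imports are used), building both outputs in one pass.
--     pts = sorted([c[0] for c in ins_coor] + [c[1] for c in inter_coor])
--
--     def bl(a, x):  # bisect_left
--         lo, hi = 0, len(a)
--         while lo < hi:
--             mid = (lo + hi) // 2
--             if a[mid] < x:
--                 lo = mid + 1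
--             else:
--                 hi = mid
--         return lo
--
--     def br(a, x):  # bisect_right
--         lo, hi = 0, len(a)
--         while lo < hi:
--             mid = (lo + hi) // 2
--             if x < a[mid]:
--                 hi = mid
--             else:
--                 lo = mid + 1
--         return lo
--
--     del_coor_filt = []
--     del_rm_ind = []
--     for ind, reg in enumerate(del_coor):
--         k = br(pts, reg[1]) - bl(pts, reg[0])
--         if k > 0:
--             del_rm_ind.extend([ind] * k)
--         else:
--             del_coor_filt.append(reg)
--     return del_coor_filt, del_rm_ind
-- ===== Notes on version B (the rewrite author's own statement) =====
-- stated objective: faster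
-- what changed: Instead of scanning every insertion and intersection point for each deletion and then re-filtering with a quadratic rm_ind membership pass, B sorts all points once and counts the points inside each deletion interval with binary search, building both outputs in a single pass. Pre_ additionally excludes inputs with an empty del_coor but a malformed point row, which A accepts only because it never reads those rows.
-- outside the precondition, e.g. on coor_rm_del([[1]], [], []): A returns ([], []), B raises IndexError
import Mathlib
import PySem

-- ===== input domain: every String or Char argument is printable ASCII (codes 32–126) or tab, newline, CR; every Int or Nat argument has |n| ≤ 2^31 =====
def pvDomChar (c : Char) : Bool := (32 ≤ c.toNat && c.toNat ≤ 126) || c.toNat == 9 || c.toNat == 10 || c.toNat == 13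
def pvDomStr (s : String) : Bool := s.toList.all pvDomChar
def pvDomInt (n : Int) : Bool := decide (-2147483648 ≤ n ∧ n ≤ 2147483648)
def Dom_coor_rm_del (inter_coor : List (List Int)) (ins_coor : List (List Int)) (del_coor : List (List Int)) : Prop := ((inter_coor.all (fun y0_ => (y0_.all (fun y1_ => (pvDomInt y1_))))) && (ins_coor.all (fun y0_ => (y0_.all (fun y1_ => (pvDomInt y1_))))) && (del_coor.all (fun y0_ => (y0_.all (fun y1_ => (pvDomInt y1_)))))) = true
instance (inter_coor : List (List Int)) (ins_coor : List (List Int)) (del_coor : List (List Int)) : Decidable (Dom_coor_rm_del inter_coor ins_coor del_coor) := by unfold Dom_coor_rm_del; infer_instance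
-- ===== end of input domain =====

-- B replaces A's per-deletion scans of all insertion/intersection points (and the quadratic
-- rm_ind membership re-filter) by one sort of the points and a binary-search count per deletion.

-- ===== PORT A =====
def rm_ind (coor_l : List (List Int)) (ind_l : List Int) : List (List Int) :=
  ((PySem.List.enumerate coor_l).filter (fun p => decide (p.1 ∉ ind_l))).map (fun p => p.2)

def coor_rm_del (inter_coor : List (List Int)) (ins_coor : List (List Int)) (del_coor : List (List Int)) : List (List Int) × List Int :=
  let st := (PySem.List.enumerate del_coor).foldl
    (fun (st : List (List Int) × List Int) p =>
      let reg_i_sta := PySem.List.pyGetD p.2 0 0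
      let reg_i_end := PySem.List.pyGetD p.2 1 0
      let del_reg_l := st.1 ++ [[reg_i_sta, reg_i_end]]
      let rm1 := ins_coor.foldl (fun acc coor =>
          if reg_i_sta ≤ PySem.List.pyGetD coor 0 0 ∧ PySem.List.pyGetD coor 0 0 ≤ reg_i_end
          then acc ++ [p.1] else acc) st.2
      let rm2 := inter_coor.foldl (fun acc coor_i =>
          if reg_i_sta ≤ PySem.List.pyGetD coor_i 1 0 ∧ PySem.List.pyGetD coor_i 1 0 ≤ reg_i_end
          then acc ++ [p.1] else acc) rm1
      (del_reg_l, rm2))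
    ([], [])
  (rm_ind del_coor st.2, st.2)

-- ===== PORT B =====
def coor_rm_del_alt (inter_coor : List (List Int)) (ins_coor : List (List Int)) (del_coor : List (List Int)) : List (List Int) × List Int :=
  let pts := PySem.List.sorted
    (ins_coor.map (fun c => PySem.List.pyGetD c 0 0) ++ inter_coor.map (fun c => PySem.List.pyGetD c 1 0)) id
  -- Source B's hand-rolled bl/br are verbatim bisect_left/bisect_right: ported as PySem.List.bisectLeft/bisectRight
  let st := (PySem.List.enumerate del_coor).foldl
    (fun (st : List (List Int) × List Int) p =>
      let k : Int := (PySem.List.bisectRight pts (PySem.List.pyGetD p.2 1 0) : Int)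
                     - (PySem.List.bisectLeft pts (PySem.List.pyGetD p.2 0 0) : Int)
      if 0 < k then (st.1, st.2 ++ List.replicate k.toNat p.1)
      else (st.1 ++ [p.2], st.2))
    ([], [])
  (st.1, st.2)

-- ===== PRECONDITION & SPEC =====
-- Pre_ excludes the inputs on which Python A raises IndexError (a deletion row with fewer than
-- 2 entries, or a deletion present together with an empty insertion row or an intersection row
-- with fewer than 2 entries), and additionally the inputs with an EMPTY del_coor but such a
-- malformed insertion/intersection row: A returns ([], []) there only because it never reads
-- those rows, while B's point-list construction reads every row and raises.
def Pre_coor_rm_del (inter_coor : List (List Int)) (ins_coor : List (List Int)) (del_coor : List (List Int)) : Prop :=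
  (∀ r ∈ del_coor, 2 ≤ r.length) ∧ (∀ r ∈ ins_coor, 1 ≤ r.length) ∧ (∀ r ∈ inter_coor, 2 ≤ r.length)
instance (inter_coor : List (List Int)) (ins_coor : List (List Int)) (del_coor : List (List Int)) : Decidable (Pre_coor_rm_del inter_coor ins_coor del_coor) := by unfold Pre_coor_rm_del; infer_instance

def pvWitness_coor_rm_del : List (List Int) × List (List Int) × List (List Int) :=
  ([[0, 5]], [[3]], [[1, 4], [10, 20]])

def Spec_coor_rm_del (inter_coor : List (List Int)) (ins_coor : List (List Int)) (del_coor : List (List Int)) (out : List (List Int) × List Int) : Prop := out = coor_rm_del_alt inter_coor ins_coor del_coor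
instance (inter_coor : List (List Int)) (ins_coor : List (List Int)) (del_coor : List (List Int)) (out : List (List Int) × List Int) : Decidable (Spec_coor_rm_del inter_coor ins_coor del_coor out) := by unfold Spec_coor_rm_del; infer_instance

-- ===== CLAIM (what is proved, stated in full; the proofs are below) =====
def Claim_equal_coor_rm_del : Prop := ∀ (inter_coor : List (List Int)) (ins_coor : List (List Int)) (del_coor : List (List Int)), Dom_coor_rm_del inter_coor ins_coor del_coor → Pre_coor_rm_del inter_coor ins_coor del_coor → Spec_coor_rm_del inter_coor ins_coor del_coor (coor_rm_del inter_coor ins_coor del_coor)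

-- ===== LEMMAS AND PROOFS =====

-- the multiset of insertion/intersection points
def ptsRaw (inter_coor ins_coor : List (List Int)) : List Int :=
  ins_coor.map (fun c => PySem.List.pyGetD c 0 0) ++ inter_coor.map (fun c => PySem.List.pyGetD c 1 0)

-- number of points inside deletion region reg (what A appends per region)
def cntOf (inter_coor ins_coor : List (List Int)) (reg : List Int) : Nat :=
  (ptsRaw inter_coor ins_coor).countP
    (fun q => decide (PySem.List.pyGetD reg 0 0 ≤ q ∧ q ≤ PySem.List.pyGetD reg 1 0))

-- B's signed count for region reg
def kOf (pts : List Int) (reg : List Int) : Int :=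
  (PySem.List.bisectRight pts (PySem.List.pyGetD reg 1 0) : Int)
  - (PySem.List.bisectLeft pts (PySem.List.pyGetD reg 0 0) : Int)

-- A's step function (definitionally the lambda inside coor_rm_del)
def AStep (inter_coor ins_coor : List (List Int)) (st : List (List Int) × List Int) (p : Int × List Int) : List (List Int) × List Int :=
  let reg_i_sta := PySem.List.pyGetD p.2 0 0
  let reg_i_end := PySem.List.pyGetD p.2 1 0
  let del_reg_l := st.1 ++ [[reg_i_sta, reg_i_end]]
  let rm1 := ins_coor.foldl (fun acc coor =>
      if reg_i_sta ≤ PySem.List.pyGetD coor 0 0 ∧ PySem.List.pyGetD coor 0 0 ≤ reg_i_end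
      then acc ++ [p.1] else acc) st.2
  let rm2 := inter_coor.foldl (fun acc coor_i =>
      if reg_i_sta ≤ PySem.List.pyGetD coor_i 1 0 ∧ PySem.List.pyGetD coor_i 1 0 ≤ reg_i_end
      then acc ++ [p.1] else acc) rm1
  (del_reg_l, rm2)

-- B's step function (definitionally the lambda inside coor_rm_del_alt)
def BStep (pts : List Int) (st : List (List Int) × List Int) (p : Int × List Int) : List (List Int) × List Int :=
  if 0 < kOf pts p.2 then (st.1, st.2 ++ List.replicate (kOf pts p.2).toNat p.1)
  else (st.1 ++ [p.2], st.2)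


lemma foldl_app_rep {α β : Type} (l : List β) (q : β → Prop) [DecidablePred q] (x : α) (acc : List α) :
    l.foldl (fun a c => if q c then a ++ [x] else a) acc
      = acc ++ List.replicate (l.countP (fun c => decide (q c))) x := by
  induction l generalizing acc with
  | nil => simp
  | cons h t ih =>
    by_cases hq : q h <;>
      simp [hq, ih, List.replicate_succ]

lemma bisect_count_aux (xs : List Int) (q : Int → Bool) (r : Nat)
    (hle : r ≤ xs.length)
    (hlt : ∀ (j : Nat) (hj : j < xs.length), j < r → q xs[j] = true)
    (hge : ∀ (j : Nat) (hj : j < xs.length), r ≤ j → q xs[j] = false) :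
    xs.countP q = r := by
  have htake : (xs.take r).countP q = r := by
    have h1 : (xs.take r).countP q = (xs.take r).length :=
      List.countP_eq_length.mpr (by
        intro a ha
        obtain ⟨i, hi, rfl⟩ := List.mem_iff_getElem.mp ha
        rw [List.getElem_take]
        exact hlt i (by simp at hi; omega) (by simp at hi; omega))
    rw [h1, List.length_take]; omega
  have hdrop : (xs.drop r).countP q = 0 := by
    rw [List.countP_eq_zero]
    intro a ha
    obtain ⟨i, hi, rfl⟩ := List.mem_iff_getElem.mp ha
    rw [List.getElem_drop]
    simp [hge (r + i) (by simp at hi; omega) (by omega)]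
  conv_lhs => rw [← List.take_append_drop r xs]
  rw [List.countP_append, htake, hdrop]
  omega

lemma bisectLeft_eq_countP (xs : List Int) (x : Int) (h : xs.Pairwise (· ≤ ·)) :
    PySem.List.bisectLeft xs x = xs.countP (fun p => decide (p < x)) := by
  obtain ⟨hle, hlt, hge⟩ := PySem.List.bisectLeft_spec xs x h
  exact (bisect_count_aux xs _ _ hle
    (fun j hj hjr => by simpa using hlt j hj hjr)
    (fun j hj hjr => by simpa using hge j hj hjr)).symm

lemma bisectRight_eq_countP (xs : List Int) (x : Int) (h : xs.Pairwise (· ≤ ·)) :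
    PySem.List.bisectRight xs x = xs.countP (fun p => decide (p ≤ x)) := by
  obtain ⟨hle, hlt, hge⟩ := PySem.List.bisectRight_spec xs x h
  exact (bisect_count_aux xs _ _ hle
    (fun j hj hjr => by simpa using hlt j hj hjr)
    (fun j hj hjr => by simpa [not_le] using hge j hj hjr)).symm

lemma countP_sub (l : List Int) (s e : Int) :
    (l.countP (fun p => decide (p ≤ e)) : Int) - l.countP (fun p => decide (p < s))
      = (l.countP (fun p => decide (s ≤ p ∧ p ≤ e)) : Int) - l.countP (fun p => decide (p < s ∧ e < p)) := by
  induction l with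
  | nil => simp
  | cons h t ih =>
    simp only [List.countP_cons]
    split_ifs <;> simp_all <;> omega

lemma k_char (inter_coor ins_coor : List (List Int)) (reg : List Int) :
    (0 < kOf (PySem.List.sorted (ptsRaw inter_coor ins_coor) id) reg ↔ 0 < cntOf inter_coor ins_coor reg)
    ∧ (0 < cntOf inter_coor ins_coor reg →
        (kOf (PySem.List.sorted (ptsRaw inter_coor ins_coor) id) reg).toNat = cntOf inter_coor ins_coor reg) := by
  set s := PySem.List.pyGetD reg 0 0
  set e := PySem.List.pyGetD reg 1 0
  set L := PySem.List.sorted (ptsRaw inter_coor ins_coor) id with hL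
  have hsorted : L.Pairwise (· ≤ ·) := by
    simpa using PySem.List.sorted_pairwise (ptsRaw inter_coor ins_coor) id
  have hperm : L.Perm (ptsRaw inter_coor ins_coor) := PySem.List.sorted_perm _ _ _
  have hk : kOf L reg
      = (L.countP (fun p => decide (s ≤ p ∧ p ≤ e)) : Int) - L.countP (fun p => decide (p < s ∧ e < p)) := by
    rw [kOf, bisectLeft_eq_countP L s hsorted, bisectRight_eq_countP L e hsorted, countP_sub]
  have hcnt : L.countP (fun p => decide (s ≤ p ∧ p ≤ e)) = cntOf inter_coor ins_coor reg :=
    hperm.countP_eq _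
  by_cases hpos : 0 < cntOf inter_coor ins_coor reg
  · have hm : L.countP (fun p => decide (p < s ∧ e < p)) = 0 := by
      rw [List.countP_eq_zero]
      obtain ⟨p0, hp0mem, hp0⟩ := List.countP_pos_iff.mp (hcnt ▸ hpos)
      simp only [decide_eq_true_eq] at hp0
      intro a _ ha
      simp only [decide_eq_true_eq] at ha
      omega
    constructor
    · rw [hk, hm, hcnt]; omega
    · intro _; rw [hk, hm, hcnt]; omega
  · constructor
    · rw [hk, hcnt]; omega
    · intro h; exact absurd h hpos

lemma AStep_snd (inter_coor ins_coor : List (List Int)) (st : List (List Int) × List Int) (p : Int × List Int) :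
    (AStep inter_coor ins_coor st p).2 = st.2 ++ List.replicate (cntOf inter_coor ins_coor p.2) p.1 := by
  simp only [AStep, foldl_app_rep, cntOf, ptsRaw, List.countP_append, List.countP_map,
    List.append_assoc, ← List.replicate_append_replicate]
  rfl

lemma mem_flatMap_rep (inter_coor ins_coor del_coor : List (List Int)) (p : Int × List Int)
    (hp : p ∈ PySem.List.enumerate del_coor 0) :
    (p.1 ∈ (PySem.List.enumerate del_coor 0).flatMap
        (fun q => List.replicate (cntOf inter_coor ins_coor q.2) q.1)
      ↔ 0 < cntOf inter_coor ins_coor p.2) := by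
  rw [List.mem_flatMap]
  constructor
  · rintro ⟨q, hq, hmem⟩
    rw [List.mem_replicate] at hmem
    obtain ⟨hne, heq⟩ := hmem
    obtain ⟨kq, hkq, rfl⟩ := (PySem.List.mem_enumerate_iff _ _ _).mp hq
    obtain ⟨kp, hkp, rfl⟩ := (PySem.List.mem_enumerate_iff _ _ _).mp hp
    simp only at heq ⊢
    have : kq = kp := by omega
    subst this
    exact Nat.pos_of_ne_zero hne
  · intro hpos
    exact ⟨p, hp, List.mem_replicate.mpr ⟨by omega, rfl⟩⟩

lemma A_fold_snd (inter_coor ins_coor : List (List Int)) (l : List (Int × List Int))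
    (r : List (List Int)) (acc : List Int) :
    (l.foldl (AStep inter_coor ins_coor) (r, acc)).2
      = acc ++ l.flatMap (fun p => List.replicate (cntOf inter_coor ins_coor p.2) p.1) := by
  induction l generalizing r acc with
  | nil => simp
  | cons h t ih =>
    simp only [List.foldl_cons, List.flatMap_cons]
    rw [show AStep inter_coor ins_coor (r, acc) h
        = ((AStep inter_coor ins_coor (r, acc) h).1, (AStep inter_coor ins_coor (r, acc) h).2) from rfl,
      AStep_snd, ih]
    simp

lemma B_fold (pts : List Int) (l : List (Int × List Int)) (f : List (List Int)) (acc : List Int) :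
    l.foldl (BStep pts) (f, acc)
      = (f ++ (l.filter (fun p => decide ¬ 0 < kOf pts p.2)).map (fun p => p.2),
         acc ++ l.flatMap (fun p => if 0 < kOf pts p.2 then List.replicate (kOf pts p.2).toNat p.1 else [])) := by
  induction l generalizing f acc with
  | nil => simp
  | cons h t ih =>
    by_cases hk : 0 < kOf pts h.2
    · simp [BStep, hk, ih]
    · simp [BStep, hk, ih, not_lt.mp hk]

-- ===== VERDICT (by name: the statement is the Claim_ definition above) =====
theorem coor_rm_del_spec : Claim_equal_coor_rm_del := by
  intro inter_coor ins_coor del_coor _ _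
  unfold Spec_coor_rm_del
  show coor_rm_del inter_coor ins_coor del_coor = coor_rm_del_alt inter_coor ins_coor del_coor
  have hA : coor_rm_del inter_coor ins_coor del_coor
      = (rm_ind del_coor (((PySem.List.enumerate del_coor 0).foldl (AStep inter_coor ins_coor) ([], [])).2),
         ((PySem.List.enumerate del_coor 0).foldl (AStep inter_coor ins_coor) ([], [])).2) := rfl
  have hB : coor_rm_del_alt inter_coor ins_coor del_coor
      = (((PySem.List.enumerate del_coor 0).foldl (BStep (PySem.List.sorted (ptsRaw inter_coor ins_coor) id)) ([], [])).1,
         ((PySem.List.enumerate del_coor 0).foldl (BStep (PySem.List.sorted (ptsRaw inter_coor ins_coor) id)) ([], [])).2) := rfl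
  rw [hA, hB]
  set pts := PySem.List.sorted (ptsRaw inter_coor ins_coor) id with hpts
  rw [B_fold, A_fold_snd]
  have hfun : (fun p : Int × List Int => List.replicate (cntOf inter_coor ins_coor p.2) p.1)
      = (fun p : Int × List Int => if 0 < kOf pts p.2 then List.replicate (kOf pts p.2).toNat p.1 else []) := by
    funext p
    by_cases hc : 0 < cntOf inter_coor ins_coor p.2
    · rw [if_pos ((k_char inter_coor ins_coor p.2).1.mpr hc), (k_char inter_coor ins_coor p.2).2 hc]
    · rw [if_neg (fun hk => hc ((k_char inter_coor ins_coor p.2).1.mp hk))]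
      simp [Nat.eq_zero_of_not_pos hc]
  dsimp only
  simp only [List.nil_append]
  rw [Prod.mk.injEq]
  refine ⟨?_, ?_⟩
  · -- first components
    have hfil : List.filter
        (fun p : Int × List Int => decide (p.1 ∉ (PySem.List.enumerate del_coor 0).flatMap
            (fun q => List.replicate (cntOf inter_coor ins_coor q.2) q.1)))
        (PySem.List.enumerate del_coor 0)
        = List.filter (fun p : Int × List Int => decide ¬ 0 < kOf pts p.2)
            (PySem.List.enumerate del_coor 0) := by
      refine List.filter_congr fun p hp => ?_
      apply decide_eq_decide.mpr
      rw [mem_flatMap_rep inter_coor ins_coor del_coor p hp]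
      exact not_congr (k_char inter_coor ins_coor p.2).1.symm
    rw [rm_ind, hfil]
  · -- second components
    rw [hfun]
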